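-- pv_equiv track=rewrite | github.com/zqexo/KMZI_Netesov | PracticalWork5-6.py | decrypt_magic_square
-- ===== SOURCE A (Python) =====
-- magic_square = [[1, 12, 13, 8], [15, 6, 3, 10], [4, 9, 16, 5], [14, 7, 2, 11]]
--
-- def decrypt_magic_square(encrypted_text):
--     n = len(magic_square)  # Размер магического квадрата (4 для 4x4)
--     matrix = [""] * (n * n)  # Создаем пустой список для расшифрованного сообщения
--
--     # Заполняем матрицу зашифрованным текстом по строкам
--     index = 0
--     for i in range(n * n):
--         if index < len(encrypted_text):  # Если есть еще символы в зашифрованном тексте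
--             matrix[i] = encrypted_text[
--                 index
--             ]  # Заполняем матрицу символами зашифрованного текста
--             index += 1
--
--     # Собираем исходное сообщение, читая матрицу по номерам ячеек магического квадрата
--     decrypted_text = ""
--     for i in range(n):
--         for j in range(n):
--             decrypted_text += matrix[
--                 magic_square[i][j] - 1
--             ]  # Собираем символы по их номеру в магическом квадрате
--
--     return decrypted_text
-- ===== SOURCE B (Python) =====
-- # B decrypts by sorting instead of indexing: argsort the flattened magic square to
-- # rank each input character, then sort the (rank, char) pairs back into output order
-- # (objective: alternative decomposition, no intermediate matrix, no index writes).
-- magic_square = [[1, 12, 13, 8], [15, 6, 3, 10], [4, 9, 16, 5], [14, 7, 2, 11]]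
--
-- def decrypt_magic_square(encrypted_text):
--     flat = [m for row in magic_square for m in row]
--     # slots[i] = output position of input character i (argsort of flat);
--     # sorting pairs (flat[k], k) lists positions k in the order of their cell numbers
--     slots = [k for _, k in sorted(zip(flat, range(16)), key=lambda p: p[0])]
--     # zip truncates to the input length, so missing cells simply never appear
--     return "".join(ch for _, ch in sorted(zip(slots, encrypted_text), key=lambda p: p[0]))
-- ===== Notes on version B (the rewrite author's own statement) =====
-- stated objective: alternative
-- what changed: A fills a 16-slot matrix in input order and then gathers characters through the magic-square rows; B uses no matrix or index writes at all: it argsorts the flattened magic square by sorting (cell-number, position) pairs to rank each input character, then sorts the (rank, char) pairs so the join emits characters directly in output order (zip truncation handles short inputs).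
import Mathlib
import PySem

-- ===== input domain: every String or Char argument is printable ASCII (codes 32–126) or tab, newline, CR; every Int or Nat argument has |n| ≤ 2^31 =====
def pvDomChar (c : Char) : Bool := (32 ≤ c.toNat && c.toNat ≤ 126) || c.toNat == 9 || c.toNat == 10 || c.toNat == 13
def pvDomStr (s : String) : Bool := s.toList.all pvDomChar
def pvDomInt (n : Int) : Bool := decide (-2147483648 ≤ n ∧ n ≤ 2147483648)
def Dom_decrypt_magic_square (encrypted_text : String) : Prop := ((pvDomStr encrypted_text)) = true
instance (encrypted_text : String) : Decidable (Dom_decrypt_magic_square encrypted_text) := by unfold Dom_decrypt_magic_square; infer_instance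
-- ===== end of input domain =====

-- B decrypts by sorting instead of index arithmetic: it argsorts the flattened magic
-- square to rank each input character and sorts (rank, char) pairs into output order,
-- with no intermediate matrix (objective: alternative decomposition, same cost).

-- ===== PORT A =====
def pvMagic : List (List Int) := [[1, 12, 13, 8], [15, 6, 3, 10], [4, 9, 16, 5], [14, 7, 2, 11]]

-- one matrix cell: encrypted_text[index] as a one-char cell; the loop's guard
-- index < len(encrypted_text) makes the lookup always succeed (the [] arm is unreachable)
def pvCell (l : List Char) (i : Int) : List Char :=
  match PySem.List.pyGet? l i with
  | some c => [c]
  | none => []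

-- the fill loop's body:  if index < len: matrix[i] = text[index]; index += 1
def pvFillStep (l : List Char) (st : List (List Char) × Int) (i : Int) : List (List Char) × Int :=
  if st.2 < (l.length : Int) then (PySem.List.pySetD st.1 i (pvCell l st.2), st.2 + 1) else st

-- the fill loop:  for i in range(n*n): …   over matrix = [""] * (n*n), index = 0
def pvFill (l : List Char) : List (List Char) × Int :=
  (PySem.List.pyRange 0 ((pvMagic.length : Int) * (pvMagic.length : Int)) 1).foldl
    (pvFillStep l)
    (List.replicate ((pvMagic.length : Int) * (pvMagic.length : Int)).toNat [], 0)

def aCore (l : List Char) : List Char :=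
  (PySem.List.pyRange 0 (pvMagic.length : Int) 1).foldl
    (fun acc i =>
      (PySem.List.pyRange 0 (pvMagic.length : Int) 1).foldl
        (fun acc2 j =>
          acc2 ++ PySem.List.pyGetD (pvFill l).1
            (PySem.List.pyGetD (PySem.List.pyGetD pvMagic i []) j 0 - 1) [])
        acc)
    []

def decrypt_magic_square (encrypted_text : String) : String :=
  String.ofList (aCore encrypted_text.toList)

-- ===== PORT B =====
-- flat = [m for row in magic_square for m in row]
def pvFlat : List Int := pvMagic.flatMap (fun row => row)

-- slots = [k for _, k in sorted(zip(flat, range(16)), key=lambda p: p[0])]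
def pvSlots : List Int :=
  (PySem.List.sorted (pvFlat.zip (PySem.List.pyRange 0 16 1)) (fun p => p.1) false).map
    (fun p => p.2)

-- "".join(ch for _, ch in sorted(zip(slots, encrypted_text), key=lambda p: p[0]))
def bCore (l : List Char) : List Char :=
  (PySem.List.sorted (pvSlots.zip l) (fun p => p.1) false).map (fun p => p.2)

def decrypt_magic_square_alt (encrypted_text : String) : String :=
  String.ofList (bCore encrypted_text.toList)

-- ===== PRECONDITION & SPEC =====
def Spec_decrypt_magic_square (encrypted_text : String) (out : String) : Prop := out = decrypt_magic_square_alt encrypted_text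
instance (encrypted_text : String) (out : String) : Decidable (Spec_decrypt_magic_square encrypted_text out) := by unfold Spec_decrypt_magic_square; infer_instance

-- ===== CLAIM (what is proved, stated in full; the proofs are below) =====
def Claim_equal_decrypt_magic_square : Prop := ∀ (encrypted_text : String), Dom_decrypt_magic_square encrypted_text → Spec_decrypt_magic_square encrypted_text (decrypt_magic_square encrypted_text)

-- ===== LEMMAS AND PROOFS =====
theorem pvCell_of_le {l : List Char} {k : Nat} (h : l.length ≤ k) :
    pvCell l (k : Int) = [] := by
  simp [pvCell, PySem.List.pyGet?_natCast, List.getElem?_eq_none h]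

theorem pv_set_prefix {α : Type} (xs : List α) (y v : α) (ys : List α) :
    (xs ++ y :: ys).set xs.length v = xs ++ v :: ys := by
  induction xs with
  | nil => rfl
  | cons a xs ih => simp [ih]

theorem pvFillStep_eval (l : List Char) (m : List (List Char)) (c i : Int) :
    pvFillStep l (m, c) i =
      if c < (l.length : Int) then (PySem.List.pySetD m i (pvCell l c), c + 1) else (m, c) := rfl

theorem pvFill_aux (l : List Char) : ∀ (n k : Nat), k + n = 16 →
    (PySem.List.pyRange (k : Int) 16 1).foldl (pvFillStep l)
      ((PySem.List.pyRange 0 (k : Int) 1).map (fun i => pvCell l i) ++ List.replicate n [],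
        ((min k l.length : Nat) : Int))
    = ((PySem.List.pyRange 0 16 1).map (fun i => pvCell l i), ((min 16 l.length : Nat) : Int)) := by
  intro n
  induction n with
  | zero =>
    intro k hk
    have hk16 : k = 16 := by omega
    subst hk16
    rw [show PySem.List.pyRange ((16:Nat) : Int) 16 1 = [] from
      PySem.List.pyRange_one_eq_nil (by norm_num), List.foldl_nil]
    simp
  | succ n ih =>
    intro k hk
    have hklt : (k : Int) < 16 := by exact_mod_cast (show k < 16 by omega)
    rw [show PySem.List.pyRange (k:Int) 16 1 = (k:Int) :: PySem.List.pyRange ((k:Int)+1) 16 1 from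
      PySem.List.pyRange_one_cons hklt, List.foldl_cons, pvFillStep_eval]
    have hlen : ((PySem.List.pyRange 0 (k : Int) 1).map (fun i => pvCell l i)).length = k := by
      simp [PySem.List.length_pyRange_one]
    have hsucc : PySem.List.pyRange 0 (((k+1:Nat)):Int) 1
        = PySem.List.pyRange 0 (k:Int) 1 ++ [(k:Int)] := by
      rw [show (((k+1:Nat)):Int) = (k:Int) + 1 by push_cast; ring]
      exact PySem.List.pyRange_one_succ_right (by positivity)
    by_cases hkl : k < l.length
    · rw [if_pos (show ((min k l.length : Nat):Int) < (l.length:Int) by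
        exact_mod_cast (show min k l.length < l.length by omega))]
      have hmin : min k l.length = k := by omega
      have hstep : ((PySem.List.pySetD
            ((PySem.List.pyRange 0 (k : Int) 1).map (fun i => pvCell l i) ++ List.replicate (n+1) [])
            (k:Int) (pvCell l ((min k l.length : Nat):Int))),
            ((min k l.length : Nat):Int) + 1)
          = ((PySem.List.pyRange 0 ((k+1:Nat):Int) 1).map (fun i => pvCell l i) ++ List.replicate n [],
            ((min (k+1) l.length : Nat) : Int)) := by
        simp only [Prod.mk.injEq]
        refine ⟨?_, by push_cast; omega⟩
        rw [hmin, PySem.List.pySetD_natCast, List.replicate_succ]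
        have hsp := pv_set_prefix ((PySem.List.pyRange 0 (k : Int) 1).map (fun i => pvCell l i))
          ([] : List Char) (pvCell l (k:Int)) (List.replicate n [])
        rw [hlen] at hsp
        rw [hsp, hsucc, List.map_append]
        simp
      rw [hstep]
      rw [show (k:Int) + 1 = (((k+1:Nat)):Int) by push_cast; ring]
      exact ih (k+1) (by omega)
    · rw [if_neg (show ¬ ((min k l.length : Nat):Int) < (l.length:Int) by
        have : min k l.length = l.length := by omega
        rw [this]; omega)]
      have hstep : (((PySem.List.pyRange 0 (k : Int) 1).map (fun i => pvCell l i) ++ List.replicate (n+1) []),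
            ((min k l.length : Nat):Int))
          = ((PySem.List.pyRange 0 ((k+1:Nat):Int) 1).map (fun i => pvCell l i) ++ List.replicate n [],
            ((min (k+1) l.length : Nat) : Int)) := by
        simp only [Prod.mk.injEq]
        refine ⟨?_, by push_cast; omega⟩
        rw [List.replicate_succ, hsucc, List.map_append]
        rw [show ([] : List Char) :: List.replicate n ([] : List Char)
            = pvCell l (k:Int) :: List.replicate n [] from by rw [pvCell_of_le (by omega)]]
        simp
      rw [hstep]
      rw [show (k:Int) + 1 = (((k+1:Nat)):Int) by push_cast; ring]
      exact ih (k+1) (by omega)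

theorem pvFill_eq (l : List Char) :
    pvFill l = ((PySem.List.pyRange 0 16 1).map (fun i => pvCell l i),
      ((min 16 l.length : Nat) : Int)) := by
  have h := pvFill_aux l 16 0 rfl
  have h16 : ((pvMagic.length : Int) * (pvMagic.length : Int)) = 16 := by decide
  unfold pvFill
  rw [h16]
  have h0 : ((min 0 l.length : Nat) : Int) = 0 := by simp
  rw [show ((16 : Int)).toNat = 16 by decide]
  simpa [h0] using h

theorem aCore_eq (l : List Char) : aCore l =
    [] ++ pvCell l 0 ++ pvCell l 11 ++ pvCell l 12 ++ pvCell l 7 ++ pvCell l 14 ++ pvCell l 5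
    ++ pvCell l 2 ++ pvCell l 9 ++ pvCell l 3 ++ pvCell l 8 ++ pvCell l 15 ++ pvCell l 4
    ++ pvCell l 13 ++ pvCell l 6 ++ pvCell l 1 ++ pvCell l 10 := by
  unfold aCore
  rw [pvFill_eq]
  have hr4 : PySem.List.pyRange 0 (pvMagic.length : Int) 1 = [0, 1, 2, 3] := by decide
  simp only [hr4, List.foldl_cons, List.foldl_nil]
  simp only [show PySem.List.pyGetD (PySem.List.pyGetD pvMagic 0 []) 0 0 - 1 = (0:Int) from by decide,
    show PySem.List.pyGetD (PySem.List.pyGetD pvMagic 0 []) 1 0 - 1 = (11:Int) from by decide,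
    show PySem.List.pyGetD (PySem.List.pyGetD pvMagic 0 []) 2 0 - 1 = (12:Int) from by decide,
    show PySem.List.pyGetD (PySem.List.pyGetD pvMagic 0 []) 3 0 - 1 = (7:Int) from by decide,
    show PySem.List.pyGetD (PySem.List.pyGetD pvMagic 1 []) 0 0 - 1 = (14:Int) from by decide,
    show PySem.List.pyGetD (PySem.List.pyGetD pvMagic 1 []) 1 0 - 1 = (5:Int) from by decide,
    show PySem.List.pyGetD (PySem.List.pyGetD pvMagic 1 []) 2 0 - 1 = (2:Int) from by decide,
    show PySem.List.pyGetD (PySem.List.pyGetD pvMagic 1 []) 3 0 - 1 = (9:Int) from by decide,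
    show PySem.List.pyGetD (PySem.List.pyGetD pvMagic 2 []) 0 0 - 1 = (3:Int) from by decide,
    show PySem.List.pyGetD (PySem.List.pyGetD pvMagic 2 []) 1 0 - 1 = (8:Int) from by decide,
    show PySem.List.pyGetD (PySem.List.pyGetD pvMagic 2 []) 2 0 - 1 = (15:Int) from by decide,
    show PySem.List.pyGetD (PySem.List.pyGetD pvMagic 2 []) 3 0 - 1 = (4:Int) from by decide,
    show PySem.List.pyGetD (PySem.List.pyGetD pvMagic 3 []) 0 0 - 1 = (13:Int) from by decide,
    show PySem.List.pyGetD (PySem.List.pyGetD pvMagic 3 []) 1 0 - 1 = (6:Int) from by decide,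
    show PySem.List.pyGetD (PySem.List.pyGetD pvMagic 3 []) 2 0 - 1 = (1:Int) from by decide,
    show PySem.List.pyGetD (PySem.List.pyGetD pvMagic 3 []) 3 0 - 1 = (10:Int) from by decide]
  rw [PySem.List.pyGetD_map_pyRange_of_nonneg _ _ _ _ (by norm_num) (by norm_num),
    PySem.List.pyGetD_map_pyRange_of_nonneg _ _ _ _ (by norm_num) (by norm_num),
    PySem.List.pyGetD_map_pyRange_of_nonneg _ _ _ _ (by norm_num) (by norm_num),
    PySem.List.pyGetD_map_pyRange_of_nonneg _ _ _ _ (by norm_num) (by norm_num),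
    PySem.List.pyGetD_map_pyRange_of_nonneg _ _ _ _ (by norm_num) (by norm_num),
    PySem.List.pyGetD_map_pyRange_of_nonneg _ _ _ _ (by norm_num) (by norm_num),
    PySem.List.pyGetD_map_pyRange_of_nonneg _ _ _ _ (by norm_num) (by norm_num),
    PySem.List.pyGetD_map_pyRange_of_nonneg _ _ _ _ (by norm_num) (by norm_num),
    PySem.List.pyGetD_map_pyRange_of_nonneg _ _ _ _ (by norm_num) (by norm_num),
    PySem.List.pyGetD_map_pyRange_of_nonneg _ _ _ _ (by norm_num) (by norm_num),
    PySem.List.pyGetD_map_pyRange_of_nonneg _ _ _ _ (by norm_num) (by norm_num),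
    PySem.List.pyGetD_map_pyRange_of_nonneg _ _ _ _ (by norm_num) (by norm_num),
    PySem.List.pyGetD_map_pyRange_of_nonneg _ _ _ _ (by norm_num) (by norm_num),
    PySem.List.pyGetD_map_pyRange_of_nonneg _ _ _ _ (by norm_num) (by norm_num),
    PySem.List.pyGetD_map_pyRange_of_nonneg _ _ _ _ (by norm_num) (by norm_num),
    PySem.List.pyGetD_map_pyRange_of_nonneg _ _ _ _ (by norm_num) (by norm_num)]
-- reducing a cell lookup one cons at a time (used on the ≥16-character case, where the tail is symbolic)
theorem pvCell_cons_zero (c : Char) (l : List Char) : pvCell (c :: l) 0 = [c] := by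
  simp [pvCell, PySem.List.pyGet?, PySem.List.pyIdx?]

theorem pvCell_cons_pos (c : Char) (l : List Char) (k : Int) (hk : 0 < k) :
    pvCell (c :: l) k = pvCell l (k - 1) := by
  unfold pvCell PySem.List.pyGet? PySem.List.pyIdx?
  rw [if_pos (by omega : (0:Int) ≤ k), if_pos (by omega : (0:Int) ≤ k - 1)]
  have hlen : (k < (((c :: l).length : Nat) : Int)) ↔ (k - 1 < ((l.length : Nat) : Int)) := by
    simp only [List.length_cons]; push_cast; omega
  by_cases h : k - 1 < ((l.length : Nat) : Int)
  · rw [if_pos (hlen.mpr h), if_pos h]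
    have hnat : k.toNat = (k - 1).toNat + 1 := by omega
    rw [hnat]
    rfl
  · rw [if_neg (fun hh => h (hlen.mp hh)), if_neg h]
    rfl

theorem slots_eq : pvSlots = [0, 14, 6, 8, 11, 5, 13, 3, 9, 7, 15, 1, 2, 12, 4, 10] := by
  decide

theorem core_eq (l : List Char) : aCore l = bCore l := by
  rw [aCore_eq]
  rcases l with _ | ⟨c0, l⟩
  ·
    simp [bCore, slots_eq, PySem.List.sorted_eq_foldl_insertBy,
      pvCell, PySem.List.pyGet?, PySem.List.pyIdx?]
  rcases l with _ | ⟨c1, l⟩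
  ·
    simp [bCore, slots_eq, PySem.List.sorted_eq_foldl_insertBy, PySem.List.insertBy,
      pvCell, PySem.List.pyGet?, PySem.List.pyIdx?]
  rcases l with _ | ⟨c2, l⟩
  ·
    simp [bCore, slots_eq, PySem.List.sorted_eq_foldl_insertBy, PySem.List.insertBy,
      pvCell, PySem.List.pyGet?, PySem.List.pyIdx?]
  rcases l with _ | ⟨c3, l⟩
  ·
    simp [bCore, slots_eq, PySem.List.sorted_eq_foldl_insertBy, PySem.List.insertBy,
      pvCell, PySem.List.pyGet?, PySem.List.pyIdx?]
  rcases l with _ | ⟨c4, l⟩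
  ·
    simp [bCore, slots_eq, PySem.List.sorted_eq_foldl_insertBy, PySem.List.insertBy,
      pvCell, PySem.List.pyGet?, PySem.List.pyIdx?]
  rcases l with _ | ⟨c5, l⟩
  ·
    simp [bCore, slots_eq, PySem.List.sorted_eq_foldl_insertBy, PySem.List.insertBy,
      pvCell, PySem.List.pyGet?, PySem.List.pyIdx?]
  rcases l with _ | ⟨c6, l⟩
  ·
    simp [bCore, slots_eq, PySem.List.sorted_eq_foldl_insertBy, PySem.List.insertBy,
      pvCell, PySem.List.pyGet?, PySem.List.pyIdx?]
  rcases l with _ | ⟨c7, l⟩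
  ·
    simp [bCore, slots_eq, PySem.List.sorted_eq_foldl_insertBy, PySem.List.insertBy,
      pvCell, PySem.List.pyGet?, PySem.List.pyIdx?]
  rcases l with _ | ⟨c8, l⟩
  ·
    simp [bCore, slots_eq, PySem.List.sorted_eq_foldl_insertBy, PySem.List.insertBy,
      pvCell, PySem.List.pyGet?, PySem.List.pyIdx?]
  rcases l with _ | ⟨c9, l⟩
  ·
    simp [bCore, slots_eq, PySem.List.sorted_eq_foldl_insertBy, PySem.List.insertBy,
      pvCell, PySem.List.pyGet?, PySem.List.pyIdx?]
  rcases l with _ | ⟨c10, l⟩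
  ·
    simp [bCore, slots_eq, PySem.List.sorted_eq_foldl_insertBy, PySem.List.insertBy,
      pvCell, PySem.List.pyGet?, PySem.List.pyIdx?]
  rcases l with _ | ⟨c11, l⟩
  ·
    simp [bCore, slots_eq, PySem.List.sorted_eq_foldl_insertBy, PySem.List.insertBy,
      pvCell, PySem.List.pyGet?, PySem.List.pyIdx?]
  rcases l with _ | ⟨c12, l⟩
  ·
    simp [bCore, slots_eq, PySem.List.sorted_eq_foldl_insertBy, PySem.List.insertBy,
      pvCell, PySem.List.pyGet?, PySem.List.pyIdx?]
  rcases l with _ | ⟨c13, l⟩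
  ·
    simp [bCore, slots_eq, PySem.List.sorted_eq_foldl_insertBy, PySem.List.insertBy,
      pvCell, PySem.List.pyGet?, PySem.List.pyIdx?]
  rcases l with _ | ⟨c14, l⟩
  ·
    simp [bCore, slots_eq, PySem.List.sorted_eq_foldl_insertBy, PySem.List.insertBy,
      pvCell, PySem.List.pyGet?, PySem.List.pyIdx?]
  rcases l with _ | ⟨c15, l⟩
  ·
    simp [bCore, slots_eq, PySem.List.sorted_eq_foldl_insertBy, PySem.List.insertBy,
      pvCell, PySem.List.pyGet?, PySem.List.pyIdx?]
  simp [bCore, slots_eq, PySem.List.sorted_eq_foldl_insertBy, PySem.List.insertBy,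
    pvCell_cons_zero, pvCell_cons_pos]

-- ===== VERDICT (by name: the statement is the Claim_ definition above) =====
theorem decrypt_magic_square_spec : Claim_equal_decrypt_magic_square := by
  intro s _
  unfold Spec_decrypt_magic_square decrypt_magic_square decrypt_magic_square_alt
  rw [core_eq]
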